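-- pv_equiv track=rewrite | github.com/sonlhcsuit/consituency-2-dependency | src/main/converter/head_percolation.py | has_same_phrase_type
-- ===== SOURCE A (Python) =====
-- def has_same_phrase_type(C_label_list):
--     phrase_type_set = set()
--     for C_label in C_label_list:
--         phrase_type = C_label.split('-')[0]
--         phrase_type_set.add(phrase_type)
--         if len(phrase_type_set) == 2:
--             return False
--     return True
-- ===== SOURCE B (Python) =====
-- def has_same_phrase_type(C_label_list):
--     if not C_label_list:
--         return True
--     ref = C_label_list[0].split('-')[0]
--     return all(label.split('-')[0] == ref for label in C_label_list[1:])
-- ===== Notes on version B (the rewrite author's own statement) =====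
-- stated objective: simpler
-- what changed: Replaces the growing set with a single scalar reference prefix taken from the first label, scanning the rest once with string equality instead of tracking set cardinality.
import Mathlib
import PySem

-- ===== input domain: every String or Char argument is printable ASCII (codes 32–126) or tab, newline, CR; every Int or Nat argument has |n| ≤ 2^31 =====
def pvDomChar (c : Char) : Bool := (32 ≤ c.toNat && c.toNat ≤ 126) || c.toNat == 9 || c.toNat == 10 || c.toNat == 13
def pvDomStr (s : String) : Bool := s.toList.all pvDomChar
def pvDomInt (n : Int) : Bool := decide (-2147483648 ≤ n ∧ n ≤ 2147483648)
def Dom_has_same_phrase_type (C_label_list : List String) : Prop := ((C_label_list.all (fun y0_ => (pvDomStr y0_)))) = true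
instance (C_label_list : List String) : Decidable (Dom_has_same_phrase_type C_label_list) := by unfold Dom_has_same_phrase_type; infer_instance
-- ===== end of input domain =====

-- B replaces A's set-cardinality tracking by a single reference prefix compared with string equality (simpler, same cost).

-- ===== PORT A =====
-- C_label.split('-')[0]: splitOn never returns an empty list, so index 0 is total (headD "" is exact here)
def pvPrefA (l : String) : String := (((PySem.Str.split? l "-").getD []).headD "")

def pvLoopA : List String → PySem.Set String → Bool
  | [], _ => true
  | l :: rest, s =>
      let s' := PySem.Set.add s (pvPrefA l)
      if PySem.Set.len s' == 2 then false else pvLoopA rest s'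

def has_same_phrase_type (C_label_list : List String) : Bool :=
  pvLoopA C_label_list PySem.Set.empty

-- ===== PORT B =====
def pvRefPref (l : String) : String := (((PySem.Str.split? l "-").getD []).headD "")

def has_same_phrase_type_alt (C_label_list : List String) : Bool :=
  match C_label_list with
  | [] => true
  | first :: rest =>
      let ref := pvRefPref first
      rest.all (fun label => pvRefPref label == ref)

-- ===== PRECONDITION & SPEC =====
def Spec_has_same_phrase_type (C_label_list : List String) (out : Bool) : Prop := out = has_same_phrase_type_alt C_label_list
instance (C_label_list : List String) (out : Bool) : Decidable (Spec_has_same_phrase_type C_label_list out) := by unfold Spec_has_same_phrase_type; infer_instance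

-- ===== CLAIM (what is proved, stated in full; the proofs are below) =====
def Claim_equal_has_same_phrase_type : Prop := ∀ (C_label_list : List String), Dom_has_same_phrase_type C_label_list → Spec_has_same_phrase_type C_label_list (has_same_phrase_type C_label_list)

-- ===== LEMMAS AND PROOFS =====
-- once the set is the singleton {p}, A's loop returns true iff every remaining prefix equals p
theorem pvLoopA_singleton (rest : List String) (p : String) :
    pvLoopA rest [p] = rest.all (fun label => pvRefPref label == p) := by
  induction rest with
  | nil => rfl
  | cons l rest ih =>
    have hpr : pvRefPref l = pvPrefA l := rfl
    by_cases h : pvPrefA l = p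
    · simp [pvLoopA, PySem.Set.add, PySem.Set.contains, PySem.Set.len, hpr, h, ih]
    · simp [pvLoopA, PySem.Set.add, PySem.Set.contains, PySem.Set.len, hpr, h]

-- ===== VERDICT (by name: the statement is the Claim_ definition above) =====
theorem has_same_phrase_type_spec : Claim_equal_has_same_phrase_type := by
  intro xs _
  unfold Spec_has_same_phrase_type
  cases xs with
  | nil => rfl
  | cons first rest =>
    show pvLoopA (first :: rest) PySem.Set.empty = _
    have hpr : pvRefPref first = pvPrefA first := rfl
    simp [pvLoopA, PySem.Set.add, PySem.Set.empty, PySem.Set.contains, PySem.Set.len,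
      has_same_phrase_type_alt, pvLoopA_singleton, hpr]
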